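-- pv_equiv track=rewrite | github.com/meher4567/intellimatch-ai-resume-screening | src/ml/advanced_match_explainer.py | _degree_meets_requirement
-- ===== SOURCE A (Python) =====
-- def _degree_meets_requirement(candidate_degree: str, required_degree: str) -> bool:
--     """Check if candidate's degree meets requirements."""
--     degree_hierarchy = {
--         'phd': 4, 'doctorate': 4, 'doctor': 4,
--         'masters': 3, 'mba': 3, 'ms': 3, 'ma': 3, 'master': 3,
--         'bachelors': 2, 'bs': 2, 'ba': 2, 'bachelor': 2,
--         'associates': 1, 'associate': 1, 'diploma': 1
--     }
--
--     candidate_level = 0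
--     required_level = 0
--
--     candidate_lower = candidate_degree.lower()
--     required_lower = required_degree.lower()
--
--     for degree, level in degree_hierarchy.items():
--         if degree in candidate_lower:
--             candidate_level = max(candidate_level, level)
--         if degree in required_lower:
--             required_level = max(required_level, level)
--
--     return candidate_level >= required_level
-- ===== SOURCE B (Python) =====
-- GROUPS = [
--     ('phd', 'doctorate', 'doctor'),
--     ('masters', 'mba', 'ms', 'ma', 'master'),
--     ('bachelors', 'bs', 'ba', 'bachelor'),
--     ('associates', 'associate', 'diploma'),
-- ]
--
--
-- def _degree_meets_requirement(candidate_degree: str, required_degree: str) -> bool: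
--     """Scan degree tiers from highest to lowest; the first tier matched by either
--     string decides: candidate match -> True, required-only match -> False.
--     No numeric levels are ever computed or compared."""
--     cand = candidate_degree.lower()
--     req = required_degree.lower()
--     for group in GROUPS:
--         if any(kw in cand for kw in group):
--             return True
--         if any(kw in req for kw in group):
--             return False
--     return True
-- ===== Notes on version B (the rewrite author's own statement) =====
-- stated objective: simpler
-- what changed: Instead of computing two numeric levels with a max-accumulating pass over the flat keyword->level dict and comparing them, B never computes a level: it scans keyword tiers from highest to lowest once and the first tier matched by either string decides the result (candidate match returns True, required-only match returns False, no match at all returns True).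
import Mathlib
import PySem

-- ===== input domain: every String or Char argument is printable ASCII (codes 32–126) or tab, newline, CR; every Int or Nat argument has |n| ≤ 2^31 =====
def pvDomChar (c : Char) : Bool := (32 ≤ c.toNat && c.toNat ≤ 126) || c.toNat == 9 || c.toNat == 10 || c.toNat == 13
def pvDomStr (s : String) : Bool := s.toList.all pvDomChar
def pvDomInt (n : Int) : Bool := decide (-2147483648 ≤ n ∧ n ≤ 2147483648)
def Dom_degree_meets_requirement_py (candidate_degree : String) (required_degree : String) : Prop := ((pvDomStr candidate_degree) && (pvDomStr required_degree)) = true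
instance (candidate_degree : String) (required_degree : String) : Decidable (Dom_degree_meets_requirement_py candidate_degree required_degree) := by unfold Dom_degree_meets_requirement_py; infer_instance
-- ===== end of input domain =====

-- B replaces A's numeric max-accumulating pass (compute two levels, compare) with a single
-- tier-descending scan that never computes a level: the first tier matched by either string
-- decides the answer (candidate match → True, required-only match → False). Objective: simpler.

-- ===== PORT A =====
-- the dict literal, in insertion order (iterated as .items())
def pvHierarchy : List (String × Int) :=
  [("phd", 4), ("doctorate", 4), ("doctor", 4),
   ("masters", 3), ("mba", 3), ("ms", 3), ("ma", 3), ("master", 3),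
   ("bachelors", 2), ("bs", 2), ("ba", 2), ("bachelor", 2),
   ("associates", 1), ("associate", 1), ("diploma", 1)]

def degree_meets_requirement_py (candidate_degree : String) (required_degree : String) : Bool :=
  let candidate_lower := PySem.Str.lower candidate_degree
  let required_lower := PySem.Str.lower required_degree
  let st := pvHierarchy.foldl (fun (st : Int × Int) p =>
      (if PySem.Str.isIn p.1 candidate_lower then max st.1 p.2 else st.1,
       if PySem.Str.isIn p.1 required_lower then max st.2 p.2 else st.2)) (0, 0)
  decide (st.1 ≥ st.2)

-- ===== PORT B =====
-- the keyword groups, ordered from highest tier to lowest (levels are implicit)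
def pvGroups : List (List String) :=
  [["phd", "doctorate", "doctor"],
   ["masters", "mba", "ms", "ma", "master"],
   ["bachelors", "bs", "ba", "bachelor"],
   ["associates", "associate", "diploma"]]

-- the descending scan with its two early returns (B's for-loop)
def pvScanGo (cand req : String) : List (List String) → Bool
  | [] => true
  | g :: rest =>
      if g.any (fun kw => PySem.Str.isIn kw cand) then true
      else if g.any (fun kw => PySem.Str.isIn kw req) then false
      else pvScanGo cand req rest

def degree_meets_requirement_py_alt (candidate_degree : String) (required_degree : String) : Bool :=
  pvScanGo (PySem.Str.lower candidate_degree) (PySem.Str.lower required_degree) pvGroups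

-- ===== PRECONDITION & SPEC =====
def Spec_degree_meets_requirement_py (candidate_degree : String) (required_degree : String) (out : Bool) : Prop := out = degree_meets_requirement_py_alt candidate_degree required_degree
instance (candidate_degree : String) (required_degree : String) (out : Bool) : Decidable (Spec_degree_meets_requirement_py candidate_degree required_degree out) := by unfold Spec_degree_meets_requirement_py; infer_instance

-- ===== CLAIM (what is proved, stated in full; the proofs are below) =====
def Claim_equal_degree_meets_requirement_py : Prop := ∀ (candidate_degree : String) (required_degree : String), Dom_degree_meets_requirement_py candidate_degree required_degree → Spec_degree_meets_requirement_py candidate_degree required_degree (degree_meets_requirement_py candidate_degree required_degree)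

-- ===== LEMMAS AND PROOFS =====

-- max over all matching keywords of a flat (keyword, level) list, as A accumulates it
def pvMOver (s : String) : List (String × Int) → Int
  | [] => 0
  | (k, v) :: t => max (if PySem.Str.isIn k s then v else 0) (pvMOver s t)

theorem pvMOver_nonneg (s : String) (L : List (String × Int)) : 0 ≤ pvMOver s L := by
  induction L with
  | nil => simp [pvMOver]
  | cons p t ih => obtain ⟨k, v⟩ := p; simp [pvMOver]; omega

-- A's single-string max-accumulating fold computes max a (pvMOver s L)
theorem pvFoldl_eq_mOver (s : String) (L : List (String × Int)) :
    ∀ a : Int, 0 ≤ a →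
      L.foldl (fun (a : Int) p => if PySem.Str.isIn p.1 s then max a p.2 else a) a
        = max a (pvMOver s L) := by
  induction L with
  | nil => intro a ha; simp [pvMOver]; omega
  | cons p t ih =>
      intro a ha
      obtain ⟨k, v⟩ := p
      by_cases h : PySem.Str.isIn k s
      · simp only [List.foldl_cons, h, if_true, pvMOver]
        rw [ih (max a v) (by omega)]
        omega
      · simp only [List.foldl_cons, h, if_false, pvMOver, Bool.false_eq_true]
        rw [ih a ha]
        have := pvMOver_nonneg s t
        omega

theorem pvMOver_append (s : String) (L1 L2 : List (String × Int)) :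
    pvMOver s (L1 ++ L2) = max (pvMOver s L1) (pvMOver s L2) := by
  induction L1 with
  | nil => have := pvMOver_nonneg s L2; simp [pvMOver]; omega
  | cons p t ih => obtain ⟨k, v⟩ := p; simp only [List.cons_append, pvMOver, ih]; omega

-- one hierarchy group: max over (k, v) pairs with a common level v is 'if any match then v else 0'
theorem pvMOver_group (s : String) (v : Int) (hv : 0 ≤ v) (ks : List String) :
    pvMOver s (ks.map (fun k => (k, v)))
      = if ks.any (fun kw => PySem.Str.isIn kw s) then v else 0 := by
  induction ks with
  | nil => simp [pvMOver]
  | cons k t ih =>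
      simp only [List.map_cons, pvMOver, ih, List.any_cons]
      by_cases h : PySem.Str.isIn k s = true <;>
        by_cases h2 : (t.any fun kw => PySem.Str.isIn kw s) = true
      · simp only [h, h2, Bool.true_or, reduceIte]; omega
      · rw [Bool.not_eq_true] at h2
        simp only [h, h2, Bool.true_or, reduceIte]; omega
      · rw [Bool.not_eq_true] at h
        simp only [h, h2, Bool.false_or, reduceIte]; omega
      · rw [Bool.not_eq_true] at h; rw [Bool.not_eq_true] at h2
        simp only [h, h2, Bool.false_or]; omega

-- the flat dict is the concatenation of the four groups
theorem pvHierarchy_eq :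
    pvHierarchy
      = (["phd", "doctorate", "doctor"].map (fun k => (k, (4 : Int))))
        ++ (["masters", "mba", "ms", "ma", "master"].map (fun k => (k, (3 : Int))))
        ++ (["bachelors", "bs", "ba", "bachelor"].map (fun k => (k, (2 : Int))))
        ++ (["associates", "associate", "diploma"].map (fun k => (k, (1 : Int)))) := rfl

-- A's pair-state fold splits into two independent single-string folds
theorem pvFoldl_pair (cl rl : String) (L : List (String × Int)) :
    ∀ (a b : Int),
      L.foldl (fun (st : Int × Int) p =>
          (if PySem.Str.isIn p.1 cl then max st.1 p.2 else st.1,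
           if PySem.Str.isIn p.1 rl then max st.2 p.2 else st.2)) (a, b)
        = (L.foldl (fun (a : Int) p => if PySem.Str.isIn p.1 cl then max a p.2 else a) a,
           L.foldl (fun (b : Int) p => if PySem.Str.isIn p.1 rl then max b p.2 else b) b) := by
  induction L with
  | nil => intro a b; rfl
  | cons p t ih => intro a b; simp only [List.foldl_cons]; exact ih _ _

-- key lemma: comparing A's two maxima over the flat dict equals B's decide-at-first-match scan
theorem pvScan_eq_compare (cl rl : String) :
    decide (pvMOver cl pvHierarchy ≥ pvMOver rl pvHierarchy) = pvScanGo cl rl pvGroups := by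
  rw [pvHierarchy_eq]
  rw [pvMOver_append, pvMOver_append, pvMOver_append,
      pvMOver_append, pvMOver_append, pvMOver_append]
  rw [pvMOver_group cl 4 (by norm_num), pvMOver_group cl 3 (by norm_num),
      pvMOver_group cl 2 (by norm_num), pvMOver_group cl 1 (by norm_num),
      pvMOver_group rl 4 (by norm_num), pvMOver_group rl 3 (by norm_num),
      pvMOver_group rl 2 (by norm_num), pvMOver_group rl 1 (by norm_num)]
  simp only [pvGroups, pvScanGo]
  split_ifs <;> decide

-- ===== VERDICT (by name: the statement is the Claim_ definition above) =====
theorem degree_meets_requirement_py_spec : Claim_equal_degree_meets_requirement_py := by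
  intro c r _
  unfold Spec_degree_meets_requirement_py degree_meets_requirement_py degree_meets_requirement_py_alt
  simp only []
  rw [pvFoldl_pair]
  rw [pvFoldl_eq_mOver _ _ 0 le_rfl, pvFoldl_eq_mOver _ _ 0 le_rfl]
  rw [max_eq_right (pvMOver_nonneg (PySem.Str.lower c) pvHierarchy),
      max_eq_right (pvMOver_nonneg (PySem.Str.lower r) pvHierarchy)]
  exact pvScan_eq_compare _ _
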